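-- pv_equiv track=rewrite | github.com/ShotaYmzk/mahjong-XAI | ver_1.1.8/custom_shanten.py | is_valid_chow
-- ===== SOURCE A (Python) =====
-- def is_valid_chow(a, b, c):
--     """Check if three tiles form a valid chow (sequence)"""
--     # Must be same suit (man, pin, or sou) and consecutive
--     if a // 9 != b // 9 or b // 9 != c // 9 or a // 9 == 3:  # Honor tiles can't form sequences
--         return False
--     # Check if the tiles form a sequence (they must be consecutive numbers in the same suit)
--     sorted_values = sorted([a % 9, b % 9, c % 9])
--     for i in range(7):
--         if sorted_values == [i, i+1, i+2]:
--             return True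
--     return False
-- ===== SOURCE B (Python) =====
-- def is_valid_chow(a, b, c):
--     """Check if three tiles form a valid chow (sequence)"""
--     if a // 9 != b // 9 or b // 9 != c // 9 or a // 9 == 3:  # honors can't form sequences
--         return False
--     s0, s1, s2 = sorted([a % 9, b % 9, c % 9])
--     return s1 == s0 + 1 and s2 == s1 + 1
-- ===== Notes on version B (the rewrite author's own statement) =====
-- stated objective: simpler
-- what changed: Replaces the search loop over the 7 candidate sequences [i,i+1,i+2] with a direct closed-form consecutiveness check on the sorted mod-9 values.
import Mathlib
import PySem

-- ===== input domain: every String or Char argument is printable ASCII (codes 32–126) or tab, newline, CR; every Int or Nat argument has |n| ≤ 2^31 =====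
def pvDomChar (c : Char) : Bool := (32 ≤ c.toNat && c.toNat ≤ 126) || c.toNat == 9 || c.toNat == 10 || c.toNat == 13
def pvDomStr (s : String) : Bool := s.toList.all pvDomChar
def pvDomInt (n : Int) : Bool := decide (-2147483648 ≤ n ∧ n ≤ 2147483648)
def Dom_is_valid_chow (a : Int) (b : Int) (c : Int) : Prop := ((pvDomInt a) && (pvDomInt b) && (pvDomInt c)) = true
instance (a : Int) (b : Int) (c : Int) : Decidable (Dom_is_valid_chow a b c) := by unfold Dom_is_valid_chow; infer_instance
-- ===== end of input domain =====

-- B is simpler: the loop over the 7 candidate sequences is replaced by a direct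
-- closed-form consecutiveness check on the sorted mod-9 values.

-- ===== PORT A =====
-- the 'for i in range(7): if sorted_values == [i, i+1, i+2]: return True' loop
def pvChowLoopA (sv : List Int) : List Int → Bool
  | [] => false
  | i :: rest => if sv == [i, i + 1, i + 2] then true else pvChowLoopA sv rest

def is_valid_chow (a : Int) (b : Int) (c : Int) : Bool :=
  if PySem.Int.floordiv a 9 != PySem.Int.floordiv b 9 ∨
     PySem.Int.floordiv b 9 != PySem.Int.floordiv c 9 ∨
     PySem.Int.floordiv a 9 == 3 then
    false
  else
    pvChowLoopA
      (PySem.List.sorted [PySem.Int.mod a 9, PySem.Int.mod b 9, PySem.Int.mod c 9] (fun x => x) false)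
      (PySem.List.pyRange 0 7 1)

-- ===== PORT B =====
def is_valid_chow_alt (a : Int) (b : Int) (c : Int) : Bool :=
  if PySem.Int.floordiv a 9 != PySem.Int.floordiv b 9 ∨
     PySem.Int.floordiv b 9 != PySem.Int.floordiv c 9 ∨
     PySem.Int.floordiv a 9 == 3 then
    false
  else
    -- s0, s1, s2 = sorted([a % 9, b % 9, c % 9]); the sorted list of three elements
    -- always has exactly three elements, so the wildcard branch is unreachable
    match PySem.List.sorted [PySem.Int.mod a 9, PySem.Int.mod b 9, PySem.Int.mod c 9] (fun x => x) false with
    | [s0, s1, s2] => s1 == s0 + 1 && s2 == s1 + 1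
    | _ => false

-- ===== PRECONDITION & SPEC =====
def Spec_is_valid_chow (a : Int) (b : Int) (c : Int) (out : Bool) : Prop := out = is_valid_chow_alt a b c
instance (a : Int) (b : Int) (c : Int) (out : Bool) : Decidable (Spec_is_valid_chow a b c out) := by unfold Spec_is_valid_chow; infer_instance

-- ===== CLAIM (what is proved, stated in full; the proofs are below) =====
def Claim_equal_is_valid_chow : Prop := ∀ (a : Int) (b : Int) (c : Int), Dom_is_valid_chow a b c → Spec_is_valid_chow a b c (is_valid_chow a b c)

-- ===== LEMMAS AND PROOFS =====

-- range(7) spelled out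
theorem pvRange7 : PySem.List.pyRange 0 7 1 = [0, 1, 2, 3, 4, 5, 6] := by decide

-- the loop over a sorted 3-element list equals the closed-form check, given the
-- bounds 0 ≤ s0, s2 ≤ 8 that mod-9 values satisfy and sortedness s0 ≤ s1 ≤ s2
theorem pvLoop_eq_closed (s0 s1 s2 : Int)
    (h0 : 0 ≤ s0) (h2 : s2 ≤ 8) (h01 : s0 ≤ s1) (h12 : s1 ≤ s2) :
    pvChowLoopA [s0, s1, s2] [0, 1, 2, 3, 4, 5, 6] = (s1 == s0 + 1 && s2 == s1 + 1) := by
  simp only [pvChowLoopA, List.cons.injEq, and_true, beq_iff_eq, Bool.and_eq_true,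
    List.cons_eq_cons]
  by_cases h : s1 = s0 + 1 ∧ s2 = s1 + 1
  · obtain ⟨e1, e2⟩ := h
    have : (s1 = s0 + 1) = True := by simp [e1]
    split_ifs with g0 g1 g2 g3 g4 g5 g6 <;>
      simp_all <;> omega
  · split_ifs with g0 g1 g2 g3 g4 g5 g6 <;> simp_all <;> omega

theorem pvSorted3 (x y z : Int) :
    ∃ s0 s1 s2, PySem.List.sorted [x, y, z] (fun v => v) false = [s0, s1, s2] ∧
      s0 ≤ s1 ∧ s1 ≤ s2 ∧
      ([s0, s1, s2] : List Int).Perm [x, y, z] := by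
  have hp := PySem.List.sorted_perm [x, y, z] (fun v : Int => v) false
  have hpw := PySem.List.sorted_pairwise (xs := [x, y, z]) (key := fun v : Int => v)
  have hl : (PySem.List.sorted [x, y, z] (fun v : Int => v) false).length = 3 := by
    simpa using hp.length_eq
  match hs : PySem.List.sorted [x, y, z] (fun v : Int => v) false with
  | [s0, s1, s2] =>
    refine ⟨s0, s1, s2, rfl, ?_, ?_, ?_⟩
    · rw [hs] at hpw
      rcases List.pairwise_cons.mp hpw with ⟨h1, _⟩
      exact h1 s1 (by simp)
    · rw [hs] at hpw
      rcases List.pairwise_cons.mp hpw with ⟨_, h2⟩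
      rcases List.pairwise_cons.mp h2 with ⟨h3, _⟩
      exact h3 s2 (by simp)
    · rw [hs] at hp; exact hp
  | [] => rw [hs] at hl; simp at hl
  | [_] => rw [hs] at hl; simp at hl
  | [_, _] => rw [hs] at hl; simp at hl
  | _ :: _ :: _ :: _ :: _ => rw [hs] at hl; simp at hl

-- ===== VERDICT (by name: the statement is the Claim_ definition above) =====
theorem is_valid_chow_spec : Claim_equal_is_valid_chow := by
  intro a b c _
  unfold Spec_is_valid_chow is_valid_chow is_valid_chow_alt
  split_ifs with hg
  · rfl
  · obtain ⟨s0, s1, s2, hs, h01, h12, hperm⟩ :=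
      pvSorted3 (PySem.Int.mod a 9) (PySem.Int.mod b 9) (PySem.Int.mod c 9)
    rw [hs, pvRange7]
    have hmem : ∀ v ∈ ([s0, s1, s2] : List Int), 0 ≤ v ∧ v ≤ 8 := by
      intro v hv
      have hv' : v ∈ [PySem.Int.mod a 9, PySem.Int.mod b 9, PySem.Int.mod c 9] := hperm.mem_iff.mp hv
      have bnd : ∀ w : Int, 0 ≤ PySem.Int.mod w 9 ∧ PySem.Int.mod w 9 ≤ 8 := by
        intro w
        have h1 := PySem.Int.mod_nonneg (a := w) (b := 9) (by norm_num)
        have h2 := PySem.Int.mod_lt (a := w) (b := 9) (by norm_num)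
        exact ⟨h1, by omega⟩
      simp only [List.mem_cons, List.mem_singleton] at hv'
      rcases hv' with h | h | h | h <;> first | (subst h; exact bnd _) | simp_all
    exact pvLoop_eq_closed s0 s1 s2 (hmem s0 (by simp)).1 (hmem s2 (by simp)).2 h01 h12
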